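-- pv_equiv track=rewrite | github.com/man2machine/6111-fpga-final-project | fpga_nn_backend/fpga_simple/emulation.py | serial_iterator_4d
-- ===== SOURCE A (Python) =====
-- def serial_iterator_4d(shape):
--     assert len(shape) == 4
--     I, J, K, L = shape
--     for i in range(I):
--         for j in range(J):
--             for k in range(K):
--                 for l in range(L):
--                     yield (i, j, k, l)
-- ===== SOURCE B (Python) =====
-- def serial_iterator_4d(shape):
--     assert len(shape) == 4
--     I, J, K, L = shape
--     if I <= 0 or J <= 0 or K <= 0 or L <= 0:
--         return
--     for n in range(I * J * K * L):
--         m, l = divmod(n, L)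
--         m, k = divmod(m, K)
--         i, j = divmod(m, J)
--         yield (i, j, k, l)
-- ===== Notes on version B (the rewrite author's own statement) =====
-- stated objective: alternative
-- what changed: Replaces the four nested loops by a single flat counter over range(I*J*K*L) that reconstructs each index 4-tuple arithmetically with three divmods (l varying fastest).
import Mathlib
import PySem

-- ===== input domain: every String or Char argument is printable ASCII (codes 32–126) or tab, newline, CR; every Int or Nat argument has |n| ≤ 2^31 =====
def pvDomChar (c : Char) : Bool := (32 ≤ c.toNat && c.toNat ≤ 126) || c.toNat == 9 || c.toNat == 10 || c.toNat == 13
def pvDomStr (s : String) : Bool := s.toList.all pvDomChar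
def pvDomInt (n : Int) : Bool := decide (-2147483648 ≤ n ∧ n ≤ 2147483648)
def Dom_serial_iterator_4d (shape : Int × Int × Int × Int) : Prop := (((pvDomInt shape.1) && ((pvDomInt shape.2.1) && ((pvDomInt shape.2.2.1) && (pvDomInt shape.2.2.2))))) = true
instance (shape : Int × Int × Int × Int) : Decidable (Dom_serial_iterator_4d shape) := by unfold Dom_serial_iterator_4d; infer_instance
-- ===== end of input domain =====

-- B replaces the four nested loops by one flat counter decoded with three divmods; alternative decomposition, same cost.

-- ===== PORT A =====
-- four nested for-loops, yielding (i, j, k, l)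
def serial_iterator_4d (shape : Int × Int × Int × Int) : List (Int × Int × Int × Int) :=
  let (I, J, K, L) := shape
  (PySem.List.pyRange 0 I 1).flatMap (fun i =>
    (PySem.List.pyRange 0 J 1).flatMap (fun j =>
      (PySem.List.pyRange 0 K 1).flatMap (fun k =>
        (PySem.List.pyRange 0 L 1).map (fun l => (i, j, k, l)))))

-- ===== PORT B =====
-- single counter n over range(I*J*K*L), decoded by divmod (l fastest)
def serial_iterator_4d_alt (shape : Int × Int × Int × Int) : List (Int × Int × Int × Int) :=
  let (I, J, K, L) := shape
  if I ≤ 0 ∨ J ≤ 0 ∨ K ≤ 0 ∨ L ≤ 0 then []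
  else
    (PySem.List.pyRange 0 (I * J * K * L) 1).map (fun n =>
      let m1 := PySem.Int.floordiv n L
      let l  := PySem.Int.mod n L
      let m2 := PySem.Int.floordiv m1 K
      let k  := PySem.Int.mod m1 K
      let i  := PySem.Int.floordiv m2 J
      let j  := PySem.Int.mod m2 J
      (i, j, k, l))

-- ===== PRECONDITION & SPEC =====
def Spec_serial_iterator_4d (shape : Int × Int × Int × Int) (out : List (Int × Int × Int × Int)) : Prop := out = serial_iterator_4d_alt shape
instance (shape : Int × Int × Int × Int) (out : List (Int × Int × Int × Int)) : Decidable (Spec_serial_iterator_4d shape out) := by unfold Spec_serial_iterator_4d; infer_instance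

-- ===== CLAIM (what is proved, stated in full; the proofs are below) =====
def Claim_equal_serial_iterator_4d : Prop := ∀ (shape : Int × Int × Int × Int), Dom_serial_iterator_4d shape → Spec_serial_iterator_4d shape (serial_iterator_4d shape)

-- ===== LEMMAS AND PROOFS =====

-- splitting range (A*B) into A blocks of B, indexed by div/mod
lemma range_mul_flatMap {α : Type} (A B : Nat) (F : Nat → Nat → List α) :
    (List.range (A * B)).flatMap (fun n => F (n / B) (n % B)) =
      (List.range A).flatMap (fun a => (List.range B).flatMap (fun b => F a b)) := by
  induction A with
  | zero => simp
  | succ A ih =>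
    rcases Nat.eq_zero_or_pos B with hB | hB
    · subst hB; simp
    · rw [Nat.succ_mul, List.range_add, List.flatMap_append, ih, List.range_succ,
        List.flatMap_append, List.flatMap_map]
      congr 1
      simp only [List.flatMap_singleton]
      apply List.flatMap_congr
      intro b hb
      have hbB : b < B := List.mem_range.mp hb
      have h1 : (A * B + b) / B = A := by
        rw [Nat.mul_comm A B, Nat.mul_add_div hB, Nat.div_eq_of_lt hbB]; omega
      have h2 : (A * B + b) % B = b := by
        rw [Nat.mul_comm A B, Nat.mul_add_mod, Nat.mod_eq_of_lt hbB]
      rw [h1, h2]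

-- full 4-D decode over Nat
lemma decode4 {α : Type} (i j k l : Nat) (f : Nat → Nat → Nat → Nat → α) :
    (List.range (i * j * k * l)).map
        (fun n => f (n / l / k / j) (n / l / k % j) (n / l % k) (n % l)) =
      (List.range i).flatMap (fun a => (List.range j).flatMap (fun b =>
        (List.range k).flatMap (fun c => (List.range l).map (fun d => f a b c d)))) := by
  have hmap : ∀ (xs : List Nat) (g : Nat → α), xs.map g = xs.flatMap (fun x => [g x]) := by
    intro xs g; exact List.map_eq_flatMap
  rw [hmap]
  rw [range_mul_flatMap (i * j * k) l (fun m d => [f (m / k / j) (m / k % j) (m % k) d])]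
  rw [range_mul_flatMap (i * j) k
      (fun m c => (List.range l).flatMap (fun d => [f (m / j) (m % j) c d]))]
  rw [range_mul_flatMap i j
      (fun a b => (List.range k).flatMap (fun c =>
        (List.range l).flatMap (fun d => [f a b c d])))]
  simp only [← List.map_eq_flatMap]

-- ===== VERDICT (by name: the statement is the Claim_ definition above) =====
theorem serial_iterator_4d_spec : Claim_equal_serial_iterator_4d := by
  unfold Claim_equal_serial_iterator_4d
  rintro ⟨I, J, K, L⟩ -
  unfold Spec_serial_iterator_4d serial_iterator_4d serial_iterator_4d_alt
  dsimp only
  by_cases h : I ≤ 0 ∨ J ≤ 0 ∨ K ≤ 0 ∨ L ≤ 0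
  · rw [if_pos h]
    rcases h with h | h | h | h <;>
      simp [PySem.List.pyRange_one_eq_nil h]
  · push Not at h
    obtain ⟨hI, hJ, hK, hL⟩ := h
    rw [if_neg (by push Not; exact ⟨hI, hJ, hK, hL⟩)]
    obtain ⟨i, rfl⟩ : ∃ m : ℕ, I = (m : Int) := ⟨I.toNat, (Int.toNat_of_nonneg hI.le).symm⟩
    obtain ⟨j, rfl⟩ : ∃ m : ℕ, J = (m : Int) := ⟨J.toNat, (Int.toNat_of_nonneg hJ.le).symm⟩
    obtain ⟨k, rfl⟩ : ∃ m : ℕ, K = (m : Int) := ⟨K.toNat, (Int.toNat_of_nonneg hK.le).symm⟩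
    obtain ⟨l, rfl⟩ : ∃ m : ℕ, L = (m : Int) := ⟨L.toNat, (Int.toNat_of_nonneg hL.le).symm⟩
    have hT : (i : Int) * j * k * l = ((i * j * k * l : ℕ) : Int) := by push_cast; ring
    rw [hT, PySem.List.pyRange_zero_nat, PySem.List.pyRange_zero_nat,
      PySem.List.pyRange_zero_nat, PySem.List.pyRange_zero_nat, PySem.List.pyRange_zero_nat]
    simp only [List.map_map, List.flatMap_map, Function.comp_def,
      PySem.Int.floordiv_natCast, PySem.Int.mod_natCast]
    exact (decode4 i j k l (fun a b c d => ((a : Int), (b : Int), (c : Int), (d : Int)))).symm
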